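-- pv_equiv track=rewrite | github.com/Pengu4566/sleipnir | grading_checks/naming.py | check_abb
-- ===== SOURCE A (Python) =====
-- def check_abb(variableType, stringBeforeUs):
--     errorName = []
--     # variable type is in dict above and format matches ['abbreviation''_''anything'] i.e.(int_counter, str_thing)
--     dic_type_abbreviation = {'string': 'str', 'int32': 'int', 'datacolumn': 'dclm', 'double': 'dbl',
--                              'dateTime': 'date', 'array': 'arr', 'list': 'lst', 'dictionary': 'dic',
--                              'exception': 'ept', 'queueItem': 'qitm'}
--     if variableType in dic_type_abbreviation.keys():
--         if stringBeforeUs != dic_type_abbreviation[variableType] + '_':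
--             errorName.append("No data type abbreviation")
--     # variable type is not in above dict but format still matches ['abbreviation''_''anything']
--     else:
--         subString = stringBeforeUs
--         for j in subString:
--             if j not in variableType:
--                 errorName.append("No data type abbreviation")
--                 break
--             variableType = variableType[(variableType.find(j) + 1):]
--     return errorName
-- ===== SOURCE B (Python) =====
-- # B: dict .get lookup + single-pass two-pointer subsequence check over a shared
-- # iterator (O(n+m)) instead of A's repeated `in`/`find`/slice rescans (O(n*m)).
-- def check_abb(variableType, stringBeforeUs):
--     abbrevs = {'string': 'str', 'int32': 'int', 'datacolumn': 'dclm', 'double': 'dbl',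
--                'dateTime': 'date', 'array': 'arr', 'list': 'lst', 'dictionary': 'dic',
--                'exception': 'ept', 'queueItem': 'qitm'}
--     abb = abbrevs.get(variableType)
--     if abb is not None:
--         return [] if stringBeforeUs == abb + '_' else ["No data type abbreviation"]
--     it = iter(variableType)
--     for j in stringBeforeUs:
--         if not any(c == j for c in it):
--             return ["No data type abbreviation"]
--     return []
-- ===== Notes on version B (the rewrite author's own statement) =====
-- stated objective: faster
-- what changed: Replaced the per-character `in`/`find`/slice rescans of variableType with a single shared iterator (two-pointer greedy subsequence check), and the keys()-membership-plus-indexing with one dict.get.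
import Mathlib
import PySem

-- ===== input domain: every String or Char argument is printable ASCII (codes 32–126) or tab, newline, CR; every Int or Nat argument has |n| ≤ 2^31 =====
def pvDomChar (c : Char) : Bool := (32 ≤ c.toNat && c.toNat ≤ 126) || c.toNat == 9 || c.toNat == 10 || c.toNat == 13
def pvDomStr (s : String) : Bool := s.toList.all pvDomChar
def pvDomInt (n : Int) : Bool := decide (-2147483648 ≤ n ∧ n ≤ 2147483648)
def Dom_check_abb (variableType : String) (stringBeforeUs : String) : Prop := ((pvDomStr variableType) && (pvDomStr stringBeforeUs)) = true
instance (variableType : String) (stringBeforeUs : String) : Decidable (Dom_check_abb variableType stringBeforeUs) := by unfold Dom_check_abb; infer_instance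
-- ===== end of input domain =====

-- B changes A's repeated in/find/slice loop into a single two-pointer subsequence scan (objective: faster).

def pvAbbrevDict : PySem.Dict String String :=
  PySem.Dict.ofList [("string", "str"), ("int32", "int"), ("datacolumn", "dclm"), ("double", "dbl"),
    ("dateTime", "date"), ("array", "arr"), ("list", "lst"), ("dictionary", "dic"),
    ("exception", "ept"), ("queueItem", "qitm")]

-- ===== PORT A =====
-- the for-loop of A: for j in subString: if j not in variableType: append+break else variableType = variableType[find(j)+1:]
def check_abb_loopA : List Char → List Char → List String → List String
  | [], _, err => err
  | j :: rest, vt, err =>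
    if PySem.Chars.isIn [j] vt = true then
      check_abb_loopA rest (PySem.List.slice vt (some (PySem.Chars.find vt [j] + 1)) none) err
    else err ++ ["No data type abbreviation"]

def check_abb (variableType : String) (stringBeforeUs : String) : List String :=
  let errorName : List String := []
  if pvAbbrevDict.contains variableType then
    if stringBeforeUs ≠ (pvAbbrevDict.getD variableType "") ++ "_" then
      errorName ++ ["No data type abbreviation"]
    else errorName
  else
    check_abb_loopA stringBeforeUs.toList variableType.toList errorName

-- ===== PORT B =====
-- `any(c == j for c in it)`: advance the shared iterator past the first j, none if exhausted
def check_abb_skip : List Char → Char → Option (List Char)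
  | [], _ => none
  | c :: cs, j => if c = j then some cs else check_abb_skip cs j

-- the for-loop of B over stringBeforeUs with the iterator's remaining suffix as state
def check_abb_loopB : List Char → List Char → Bool
  | [], _ => true
  | j :: rest, vt =>
    match check_abb_skip vt j with
    | none => false
    | some vt' => check_abb_loopB rest vt'

def check_abb_alt (variableType : String) (stringBeforeUs : String) : List String :=
  match pvAbbrevDict.get? variableType with
  | some abb => if stringBeforeUs = abb ++ "_" then [] else ["No data type abbreviation"]
  | none =>
    if check_abb_loopB stringBeforeUs.toList variableType.toList then []
    else ["No data type abbreviation"]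

-- ===== PRECONDITION & SPEC =====
def Spec_check_abb (variableType : String) (stringBeforeUs : String) (out : List String) : Prop := out = check_abb_alt variableType stringBeforeUs
instance (variableType : String) (stringBeforeUs : String) (out : List String) : Decidable (Spec_check_abb variableType stringBeforeUs out) := by unfold Spec_check_abb; infer_instance

-- ===== CLAIM (what is proved, stated in full; the proofs are below) =====
def Claim_equal_check_abb : Prop := ∀ (variableType : String) (stringBeforeUs : String), Dom_check_abb variableType stringBeforeUs → Spec_check_abb variableType stringBeforeUs (check_abb variableType stringBeforeUs)

-- ===== LEMMAS AND PROOFS =====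

-- characterisation of find.go on a single-character needle via check_abb_skip
theorem skip_go (j : Char) : ∀ (vt : List Char) (k : Nat),
    (check_abb_skip vt j = none → PySem.Chars.find.go [j] vt k = -1) ∧
    (∀ cs, check_abb_skip vt j = some cs →
      ∃ i : Nat, PySem.Chars.find.go [j] vt k = ((k + i : Nat) : Int) ∧ vt.drop (i + 1) = cs) := by
  intro vt
  induction vt with
  | nil =>
    intro k
    constructor
    · intro _; simp [PySem.Chars.find.go]
    · intro cs h; simp [check_abb_skip] at h
  | cons c cs ih =>
    intro k
    by_cases hc : c = j
    · constructor
      · intro h; simp [check_abb_skip, hc] at h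
      · intro ds h
        simp [check_abb_skip, hc] at h
        refine ⟨0, ?_, by simp [h]⟩
        simp [PySem.Chars.find.go, List.isPrefixOf, hc]
    · have hpre : List.isPrefixOf [j] (c :: cs) = false := by
        simp [List.isPrefixOf]; intro h; exact absurd h.symm hc
      constructor
      · intro h
        simp [check_abb_skip, hc] at h
        have := (ih (k + 1)).1 h
        simpa [PySem.Chars.find.go, hpre] using this
      · intro ds h
        simp [check_abb_skip, hc] at h
        obtain ⟨i, hgo, hdrop⟩ := (ih (k + 1)).2 ds h
        refine ⟨i + 1, ?_, ?_⟩
        · simp [PySem.Chars.find.go, hpre, hgo]; omega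
        · simpa using hdrop
-- isIn through find.go
theorem isIn_eq_go (j : Char) (vt : List Char) :
    PySem.Chars.isIn [j] vt = (PySem.Chars.find.go [j] vt 0 != -1) := by
  simp [PySem.Chars.isIn, PySem.Chars.find]

theorem loop_eq : ∀ (s vt : List Char),
    check_abb_loopA s vt [] =
      (if check_abb_loopB s vt then ([] : List String) else ["No data type abbreviation"]) := by
  intro s
  induction s with
  | nil => intro vt; simp [check_abb_loopA, check_abb_loopB]
  | cons j rest ih =>
    intro vt
    rcases h : check_abb_skip vt j with _ | vt'
    · have hgo := (skip_go j vt 0).1 h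
      have hin : PySem.Chars.isIn [j] vt = false := by
        rw [isIn_eq_go, hgo]; simp
      simp [check_abb_loopA, check_abb_loopB, hin, h]
    · obtain ⟨i, hgo, hdrop⟩ := (skip_go j vt 0).2 vt' h
      have hin : PySem.Chars.isIn [j] vt = true := by
        rw [isIn_eq_go, hgo]; simp
      have hfind : PySem.Chars.find vt [j] = (i : Int) := by
        simp [PySem.Chars.find, hgo]
      have hslice : PySem.List.slice vt (some (PySem.Chars.find vt [j] + 1)) none = vt' := by
        rw [hfind]
        have : ((i : Int) + 1) = ((i + 1 : Nat) : Int) := by push_cast; ring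
        rw [this, PySem.List.slice_from_natCast]
        exact hdrop
      simp [check_abb_loopA, check_abb_loopB, hin, h, hslice, ih]

-- ===== VERDICT (by name: the statement is the Claim_ definition above) =====
theorem check_abb_spec : Claim_equal_check_abb := by
  intro variableType stringBeforeUs _
  unfold Spec_check_abb check_abb check_abb_alt
  rcases hg : pvAbbrevDict.get? variableType with _ | abb
  · have hc : pvAbbrevDict.contains variableType = false := by
      simp [PySem.Dict.contains_eq_isSome_get?, hg]
    simp only [hc, Bool.false_eq_true, if_false]
    exact loop_eq _ _
  · have hc : pvAbbrevDict.contains variableType = true := by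
      simp [PySem.Dict.contains_eq_isSome_get?, hg]
    have hd : pvAbbrevDict.getD variableType "" = abb := by
      simp [PySem.Dict.getD, hg]
    simp only [hc, if_true, hd]
    by_cases he : stringBeforeUs = abb ++ "_" <;> simp [he]
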